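-- pv_equiv track=rewrite | github.com/silvercloud1442/bimbimbambam | finder.py | below_zeros
-- ===== SOURCE A (Python) =====
-- def below_zeros(glass):
--     np_glass = [i for i in list(map(list, zip(*glass))) if 0 in i]
--     zeros = 0
--     for row in np_glass:
--         if 1 in row or 2 in row:
--             new_row = map(str, row)
--             closed = False
--             for i in new_row:
--                 if i == '1' or i == '2':
--                     closed = True
--                 if closed and i == '0':
--                     zeros += 1
--     return zeros
-- ===== SOURCE B (Python) =====
-- def below_zeros(glass):
--     if not glass:
--         return 0
--     ncols = min(len(r) for r in glass)
--     closed = [False] * ncols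
--     zeros = 0
--     for row in glass:
--         new_closed = []
--         for v, cl in zip(row, closed):
--             cl = cl or v == 1 or v == 2
--             new_closed.append(cl)
--             if cl and v == 0:
--                 zeros += 1
--         closed = new_closed
--     return zeros
-- ===== Notes on version B (the rewrite author's own statement) =====
-- stated objective: alternative
-- what changed: A transposes the grid, filters columns containing 0, and scans each column with str-converted comparisons; B makes a single row-major pass over the original rows, threading a per-column 'closed' flag list and one counter, with plain integer comparisons and no transpose/filter.
import Mathlib
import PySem

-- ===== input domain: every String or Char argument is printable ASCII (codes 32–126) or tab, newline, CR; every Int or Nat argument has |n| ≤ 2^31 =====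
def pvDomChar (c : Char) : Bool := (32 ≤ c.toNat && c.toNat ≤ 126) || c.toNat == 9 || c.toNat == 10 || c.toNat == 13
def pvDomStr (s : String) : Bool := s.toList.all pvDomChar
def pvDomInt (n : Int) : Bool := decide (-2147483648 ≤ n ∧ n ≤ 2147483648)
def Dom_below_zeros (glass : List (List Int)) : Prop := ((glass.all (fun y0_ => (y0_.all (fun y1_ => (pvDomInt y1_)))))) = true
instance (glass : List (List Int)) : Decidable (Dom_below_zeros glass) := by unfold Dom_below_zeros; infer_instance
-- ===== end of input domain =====

-- B replaces A's transpose-then-scan-each-column (with str-converted comparisons) by a single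
-- row-major pass threading per-column 'closed' flags; objective: simpler/alternative decomposition.

-- ===== PORT A =====
-- zip(*glass) truncates every row to the minimum row length
def pyMinLen : List (List Int) → Nat
  | [] => 0
  | r :: rs => rs.foldl (fun m x => min m x.length) r.length

-- list(map(list, zip(*glass))); indices j < pyMinLen are in range for every row, so getD is exact
def pyTranspose (rows : List (List Int)) : List (List Int) :=
  (List.range (pyMinLen rows)).map (fun j => rows.map (fun r => r.getD j 0))

def below_zeros (glass : List (List Int)) : Int :=
  let np_glass := (pyTranspose glass).filter (fun i => i.contains 0)
  np_glass.foldl (fun zeros row =>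
    if row.contains 1 || row.contains 2 then
      (row.foldl (fun (p : Int × Bool) i =>
        let s := PySem.Int.toStr i
        let closed := if s == "1" || s == "2" then true else p.2
        (if closed && (s == "0") then p.1 + 1 else p.1, closed)) (zeros, false)).1
    else zeros) 0

-- ===== PORT B =====
def below_zeros_alt (glass : List (List Int)) : Int :=
  match glass with
  | [] => 0
  | r :: rs =>
    let ncols := rs.foldl (fun m x => min m x.length) r.length
    ((r :: rs).foldl (fun (st : Int × List Bool) row =>
        (List.zip row st.2).foldl (fun (q : Int × List Bool) vc =>
          let cl := vc.2 || vc.1 == 1 || vc.1 == 2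
          (if cl && vc.1 == 0 then q.1 + 1 else q.1, q.2 ++ [cl])) (st.1, ([] : List Bool)))
      ((0 : Int), List.replicate ncols false)).1

-- ===== PRECONDITION & SPEC =====
def Spec_below_zeros (glass : List (List Int)) (out : Int) : Prop := out = below_zeros_alt glass
instance (glass : List (List Int)) (out : Int) : Decidable (Spec_below_zeros glass out) := by unfold Spec_below_zeros; infer_instance

-- ===== CLAIM (what is proved, stated in full; the proofs are below) =====
def Claim_equal_below_zeros : Prop := ∀ (glass : List (List Int)), Dom_below_zeros glass → Spec_below_zeros glass (below_zeros glass)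

-- ===== LEMMAS AND PROOFS =====

-- str(i) == 'd' for a digit d is exactly i == d on ints
theorem digitChar_inj_lt10 : ∀ a, a < 10 → ∀ b, b < 10 → Nat.digitChar a = Nat.digitChar b → a = b := by decide

theorem toDigitsCore_len_ge (b : Nat) : ∀ (fuel n : Nat) (acc : List Char),
    acc.length ≤ (Nat.toDigitsCore b fuel n acc).length := by
  intro fuel
  induction fuel with
  | zero => intro n acc; rw [Nat.toDigitsCore]
  | succ fuel ih =>
    intro n acc
    rw [Nat.toDigitsCore]
    split
    · simp
    · exact le_trans (by simp) (ih (n / b) ((n % b).digitChar :: acc))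

theorem toDigitsCore_len_succ (b : Nat) : ∀ (fuel n : Nat) (acc : List Char), 0 < fuel →
    acc.length + 1 ≤ (Nat.toDigitsCore b fuel n acc).length := by
  intro fuel n acc hf
  match fuel, hf with
  | fuel + 1, _ =>
    rw [Nat.toDigitsCore]
    split
    · simp
    · exact le_trans (by simp) (toDigitsCore_len_ge b fuel _ _)

theorem toDigits_len2 (m : Nat) (h : 10 ≤ m) : 2 ≤ (Nat.toDigits 10 m).length := by
  unfold Nat.toDigits
  obtain ⟨k, rfl⟩ : ∃ k, m = k + 10 := ⟨m - 10, by omega⟩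
  rw [Nat.toDigitsCore]
  have hne : (k + 10) / 10 ≠ 0 := by omega
  rw [if_neg hne]
  exact le_trans (by simp) (toDigitsCore_len_succ 10 (k + 10) _ _ (by omega))

theorem toDigits_lt10 (m : Nat) (h : m < 10) : Nat.toDigits 10 m = [Nat.digitChar m] := by
  interval_cases m <;> rfl

theorem toStr_eq_digit (i : Int) (m : Nat) (hm : m < 10) :
    (PySem.Int.toStr i = String.ofList [Nat.digitChar m]) ↔ i = (m : Int) := by
  constructor
  · intro h
    have hl : PySem.Int.toChars i = [Nat.digitChar m] := by
      have := congrArg String.toList h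
      simpa [PySem.Int.toStr, PySem.Int.toList_toStr] using this
    unfold PySem.Int.toChars at hl
    split at hl
    · -- negative: leading '-' is not a digit char
      exfalso
      have : '-' = Nat.digitChar m := by
        have := congrArg (fun l => l.headD ' ') hl
        simpa using this
      interval_cases m <;> exact absurd this (by decide)
    · rename_i hneg
      have hlt : i.toNat < 10 := by
        by_contra hge
        have := toDigits_len2 i.toNat (by omega)
        rw [hl] at this; simp at this
      rw [toDigits_lt10 i.toNat hlt] at hl
      have := digitChar_inj_lt10 i.toNat hlt m hm (by simpa using hl)
      omega
  · rintro rfl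
    unfold PySem.Int.toStr PySem.Int.toChars
    rw [if_neg (by omega : ¬ ((m : Int) < 0)), (by omega : ((m : Int)).toNat = m),
      toDigits_lt10 m hm]

theorem toStr_beq_one (i : Int) : (PySem.Int.toStr i == "1") = (i == 1) := by
  have h := toStr_eq_digit i 1 (by norm_num)
  rw [(by decide : String.ofList [Nat.digitChar 1] = "1")] at h
  by_cases hi : i = 1
  · subst hi; simp [h.mpr rfl]
  · have hne : ¬ PySem.Int.toStr i = "1" := fun hc => hi (by exact_mod_cast h.mp hc)
    simp [hne, hi]
theorem toStr_beq_two (i : Int) : (PySem.Int.toStr i == "2") = (i == 2) := by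
  have h := toStr_eq_digit i 2 (by norm_num)
  rw [(by decide : String.ofList [Nat.digitChar 2] = "2")] at h
  by_cases hi : i = 2
  · subst hi; simp [h.mpr rfl]
  · have hne : ¬ PySem.Int.toStr i = "2" := fun hc => hi (by exact_mod_cast h.mp hc)
    simp [hne, hi]
theorem toStr_beq_zero (i : Int) : (PySem.Int.toStr i == "0") = (i == 0) := by
  have h := toStr_eq_digit i 0 (by norm_num)
  rw [(by decide : String.ofList [Nat.digitChar 0] = "0")] at h
  by_cases hi : i = 0
  · subst hi; simp [h.mpr rfl]
  · have hne : ¬ PySem.Int.toStr i = "0" := fun hc => hi (by exact_mod_cast h.mp hc)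
    simp [hne, hi]

-- the common per-cell step, on integer comparisons
def colStep (p : Int × Bool) (i : Int) : Int × Bool :=
  let closed := if i == 1 || i == 2 then true else p.2
  (if closed && (i == 0) then p.1 + 1 else p.1, closed)

def colCount (col : List Int) (b : Bool) : Int := (col.foldl colStep (0, b)).1

theorem stepA_eq_colStep :
    (fun (p : Int × Bool) (i : Int) =>
      let s := PySem.Int.toStr i
      let closed := if s == "1" || s == "2" then true else p.2
      (if closed && (s == "0") then p.1 + 1 else p.1, closed)) = colStep := by
  funext p i
  simp only [toStr_beq_one, toStr_beq_two, toStr_beq_zero, colStep]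

theorem colStep_foldl_add : ∀ (l : List Int) (a : Int) (b : Bool),
    l.foldl colStep (a, b) = (a + (l.foldl colStep (0, b)).1, (l.foldl colStep (0, b)).2) := by
  intro l
  induction l with
  | nil => intro a b; simp
  | cons v l ih =>
    intro a b
    simp only [List.foldl_cons]
    rw [ih (colStep (a, b) v).1 (colStep (a, b) v).2,
        ih (colStep (0, b) v).1 (colStep (0, b) v).2]
    have h1 : (colStep (a, b) v).1 = a + (colStep (0, b) v).1 := by
      simp only [colStep]; split <;> split <;> omega
    have h2 : (colStep (a, b) v).2 = (colStep (0, b) v).2 := by simp [colStep]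
    rw [h1, h2]; ring_nf

theorem colCount_cons (v : Int) (l : List Int) (b : Bool) :
    colCount (v :: l) b = (colStep (0, b) v).1 + colCount l (colStep (0, b) v).2 := by
  unfold colCount
  simp only [List.foldl_cons]
  rw [colStep_foldl_add l (colStep (0, b) v).1 (colStep (0, b) v).2]

theorem colCount_no_zero : ∀ (l : List Int) (b : Bool), ¬ l.contains 0 → colCount l b = 0 := by
  intro l
  induction l with
  | nil => intro b _; rfl
  | cons v l ih =>
    intro b h
    simp only [List.contains_cons, Bool.or_eq_true, beq_iff_eq, not_or] at h
    rw [colCount_cons]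
    have hv0 : (v == 0) = false := beq_eq_false_iff_ne.mpr (fun hc => h.1 hc.symm)
    have hstep : (colStep (0, b) v).1 = 0 := by simp [colStep, hv0]
    rw [hstep, ih _ (by simpa using h.2)]
    simp

theorem colCount_no_onetwo : ∀ (l : List Int), ¬ (l.contains 1 || l.contains 2) = true →
    colCount l false = 0 := by
  intro l
  induction l with
  | nil => intro _; rfl
  | cons v l ih =>
    intro h
    simp only [List.contains_cons, Bool.or_eq_true, beq_iff_eq, not_or] at h
    have hv1 : (v == 1) = false := beq_eq_false_iff_ne.mpr (fun hc => h.1.1 hc.symm)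
    have hv2 : (v == 2) = false := beq_eq_false_iff_ne.mpr (fun hc => h.2.1 hc.symm)
    rw [colCount_cons]
    have hs : colStep (0, false) v = (0, false) := by simp [colStep, hv1, hv2]
    rw [hs]
    have htl : ¬ (l.contains 1 || l.contains 2) = true := by
      simp only [Bool.or_eq_true, not_or]
      exact ⟨fun hc => h.1.2 (by simpa using hc), fun hc => h.2.2 (by simpa using hc)⟩
    simpa using ih htl

-- A's outer loop over the filtered columns sums colCount over ALL columns
theorem foldA_eq_sum : ∀ (l : List (List Int)) (z : Int),
    ((l.filter (fun i => i.contains 0)).foldl (fun zeros row =>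
      if row.contains 1 || row.contains 2 then
        (row.foldl colStep (zeros, false)).1
      else zeros) z) = z + (l.map (fun col => colCount col false)).sum := by
  intro l
  induction l with
  | nil => intro z; simp
  | cons col l ih =>
    intro z
    by_cases h0 : (col.contains 0) = true
    · rw [List.filter_cons, if_pos (by simpa using h0)]
      simp only [List.foldl_cons]
      by_cases h12 : (col.contains 1 || col.contains 2) = true
      · rw [if_pos h12, colStep_foldl_add, ih]
        simp [colCount]; ring
      · rw [if_neg h12, ih]
        simp [colCount_no_onetwo col h12]
    · rw [List.filter_cons, if_neg (by simpa using h0)]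
      rw [ih]
      simp [colCount_no_zero col false h0]

theorem range_map_getD {α : Type} : ∀ (l : List α) (d : α),
    (List.range l.length).map (fun j => l.getD j d) = l := by
  intro l
  induction l with
  | nil => intro d; simp
  | cons a l ih =>
    intro d
    rw [List.length_cons, List.range_succ_eq_map, List.map_cons, List.map_map]
    simp only [List.getD_cons_zero, Function.comp_def, List.getD_cons_succ]
    rw [ih]

theorem below_zeros_eq_sum (glass : List (List Int)) :
    below_zeros glass =
      ((List.range (pyMinLen glass)).map
        (fun j => colCount (glass.map (fun r => r.getD j 0)) false)).sum := by
  unfold below_zeros pyTranspose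
  simp only [stepA_eq_colStep]
  rw [foldA_eq_sum, List.map_map]
  simp [Function.comp_def]

-- B's inner loop (over zip row closed) characterised
theorem inner_spec : ∀ (ps : List (Int × Bool)) (z : Int) (acc : List Bool),
    ps.foldl (fun (q : Int × List Bool) vc =>
        let cl := vc.2 || vc.1 == 1 || vc.1 == 2
        (if cl && vc.1 == 0 then q.1 + 1 else q.1, q.2 ++ [cl])) (z, acc) =
      (z + (ps.map (fun vc => (colStep (0, vc.2) vc.1).1)).sum,
       acc ++ ps.map (fun vc => (colStep (0, vc.2) vc.1).2)) := by
  intro ps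
  induction ps with
  | nil => intro z acc; simp
  | cons vc ps ih =>
    intro z acc
    simp only [List.foldl_cons, List.map_cons, List.sum_cons]
    have hflag : (vc.2 || vc.1 == 1 || vc.1 == 2) = (colStep (0, vc.2) vc.1).2 := by
      simp only [colStep, Bool.or_assoc]
      cases hb : (vc.1 == 1 || vc.1 == 2) <;> cases hc : vc.2 <;> simp_all
    have hinc : (if (vc.2 || vc.1 == 1 || vc.1 == 2) && vc.1 == 0 then z + 1 else z) =
        z + (colStep (0, vc.2) vc.1).1 := by
      simp only [colStep, Bool.or_assoc]
      cases hb : (vc.1 == 1 || vc.1 == 2) <;> cases hc : vc.2 <;>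
        cases h0 : (vc.1 == 0) <;> simp_all
    show (ps.foldl _ (if (vc.2 || vc.1 == 1 || vc.1 == 2) && vc.1 == 0 then z + 1 else z,
        acc ++ [vc.2 || vc.1 == 1 || vc.1 == 2])) = _
    rw [hinc, hflag, ih]
    rw [Prod.ext_iff]
    refine ⟨by dsimp; ring, by dsimp; simp⟩

theorem getD_zip {r : List Int} {cl : List Bool} {j : Nat} (hj : j < cl.length)
    (hlen : cl.length ≤ r.length) :
    (List.zip r cl).getD j (0, false) = (r.getD j 0, cl.getD j false) := by
  have hjz : j < (List.zip r cl).length := by simp [List.length_zip]; omega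
  have hjr : j < r.length := by omega
  rw [List.getD_eq_getElem _ _ hjz, List.getD_eq_getElem _ _ hjr, List.getD_eq_getElem _ _ hj]
  simp [List.getElem_zip]

theorem map_eq_range_map {α β : Type} (l : List α) (d : α) (f : α → β) :
    l.map f = (List.range l.length).map (fun j => f (l.getD j d)) := by
  conv_lhs => rw [← range_map_getD l d]
  rw [List.map_map]
  simp [Function.comp_def]

theorem sum_map_add_helper {α : Type} (l : List α) (f g : α → Int) :
    (l.map (fun x => f x + g x)).sum = (l.map f).sum + (l.map g).sum := by
  induction l with
  | nil => simp
  | cons a l ih => simp [ih]; ring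

theorem getD_replicate_false (n j : Nat) : (List.replicate n false).getD j false = false := by
  by_cases h : j < n
  · rw [List.getD_eq_getElem _ _ (by simpa using h)]; simp
  · rw [List.getD_eq_default _ _ (by simpa using h)]

-- B's row-major fold equals the sum over columns of the column scan
theorem B_inv : ∀ (rows : List (List Int)) (z : Int) (cl : List Bool),
    (∀ r ∈ rows, cl.length ≤ r.length) →
    (rows.foldl (fun (st : Int × List Bool) row =>
        (List.zip row st.2).foldl (fun (q : Int × List Bool) vc =>
          let cl := vc.2 || vc.1 == 1 || vc.1 == 2
          (if cl && vc.1 == 0 then q.1 + 1 else q.1, q.2 ++ [cl])) (st.1, ([] : List Bool)))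
      (z, cl)).1 =
    z + ((List.range cl.length).map
          (fun j => colCount (rows.map (fun r => r.getD j 0)) (cl.getD j false))).sum := by
  intro rows
  induction rows with
  | nil => intro z cl _; simp [colCount]
  | cons r rows ih =>
    intro z cl hlen
    have hr : cl.length ≤ r.length := hlen r (List.mem_cons_self ..)
    simp only [List.foldl_cons]
    rw [inner_spec]
    have hzlen : (List.zip r cl).length = cl.length := by
      simp [List.length_zip]; omega
    set cl' : List Bool := [] ++ (List.zip r cl).map (fun vc => (colStep (0, vc.2) vc.1).2) with hcl'
    have hcl'len : cl'.length = cl.length := by simp [hcl', hzlen]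
    have hcl'getD : ∀ j, j < cl.length →
        cl'.getD j false = (colStep (0, cl.getD j false) (r.getD j 0)).2 := by
      intro j hj
      have hjz : j < (List.zip r cl).length := by omega
      simp only [hcl', List.nil_append]
      rw [List.getD_eq_getElem _ _ (by simpa using hjz)]
      simp only [List.getElem_map]
      rw [← List.getD_eq_getElem _ (0, false) hjz, getD_zip hj hr]
    rw [ih _ cl' (fun r' hr' => by rw [hcl'len]; exact hlen r' (List.mem_cons_of_mem _ hr'))]
    rw [hcl'len]
    -- combine the head-row contributions with the tail sums, column by column
    have hsum : ((List.zip r cl).map (fun vc => (colStep (0, vc.2) vc.1).1)).sum =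
        ((List.range cl.length).map
          (fun j => (colStep (0, cl.getD j false) (r.getD j 0)).1)).sum := by
      rw [map_eq_range_map (List.zip r cl) (0, false) (fun vc => (colStep (0, vc.2) vc.1).1), hzlen]
      congr 1
      apply List.map_congr_left
      intro j hj
      rw [getD_zip (by simpa using hj) hr]
    rw [hsum]
    have hcols : (List.range cl.length).map
          (fun j => colCount (rows.map (fun r => r.getD j 0)) (cl'.getD j false)) =
        (List.range cl.length).map
          (fun j => colCount (rows.map (fun r => r.getD j 0))
            (colStep (0, cl.getD j false) (r.getD j 0)).2) := by
      apply List.map_congr_left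
      intro j hj
      rw [hcl'getD j (by simpa using hj)]
    rw [hcols]
    have hcomb : (List.range cl.length).map
          (fun j => colCount (((r :: rows)).map (fun r => r.getD j 0)) (cl.getD j false)) =
        (List.range cl.length).map
          (fun j => (colStep (0, cl.getD j false) (r.getD j 0)).1 +
            colCount (rows.map (fun r => r.getD j 0))
              (colStep (0, cl.getD j false) (r.getD j 0)).2) := by
      apply List.map_congr_left
      intro j _
      rw [List.map_cons, colCount_cons]
    rw [hcomb, sum_map_add_helper]
    ring

theorem minLen_le : ∀ (rs : List (List Int)) (a : Nat),
    rs.foldl (fun m x => min m x.length) a ≤ a ∧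
    ∀ x ∈ rs, rs.foldl (fun m x => min m x.length) a ≤ x.length := by
  intro rs
  induction rs with
  | nil => intro a; simp
  | cons y rs ih =>
    intro a
    simp only [List.foldl_cons]
    obtain ⟨h1, h2⟩ := ih (min a y.length)
    refine ⟨le_trans h1 (by omega), ?_⟩
    intro x hx
    rcases List.mem_cons.mp hx with rfl | hx
    · exact le_trans h1 (by omega)
    · exact h2 x hx

-- ===== VERDICT (by name: the statement is the Claim_ definition above) =====
theorem below_zeros_spec : Claim_equal_below_zeros := by
  intro glass _
  unfold Spec_below_zeros
  rw [below_zeros_eq_sum]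
  match glass with
  | [] => rfl
  | r :: rs =>
    unfold below_zeros_alt
    dsimp only
    rw [B_inv (r :: rs) 0 (List.replicate (rs.foldl (fun m x => min m x.length) r.length) false)
      (by
        intro r' hr'
        rw [List.length_replicate]
        rcases List.mem_cons.mp hr' with rfl | h
        · exact (minLen_le rs r'.length).1
        · exact (minLen_le rs r.length).2 r' h)]
    simp only [List.length_replicate, getD_replicate_false, pyMinLen, zero_add]
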